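-- pv_equiv track=rewrite | github.com/Brian-Ckwu/mtl-icda-ht | utils/data.py | convert_icds_to_indices
-- ===== SOURCE A (Python) =====
-- def convert_icds_to_indices(icds: list[str], full_code: bool = True) -> list[int]:
--     # utility functions
--     def get_converted_icd(icd):
--         return str(icd) if full_code else str(icd)[:3]
--
--     def get_icd_idx_mapping():
--         icd2idx = dict()
--         for icd in icds:
--             icd = get_converted_icd(icd)
--             if icd not in icd2idx:
--                 icd2idx[icd] = len(icd2idx)
--         return icd2idx
--
--     # conversion
--     icd2idx = get_icd_idx_mapping()
--     indices = list()
--     for icd in icds: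
--         icd = get_converted_icd(icd)
--         idx = icd2idx[icd]
--         indices.append(idx)
--
--     return indices
-- ===== SOURCE B (Python) =====
-- def convert_icds_to_indices(icds: list[str], full_code: bool = True) -> list[int]:
--     # Per-element closed formula: the index assigned to a code equals the number
--     # of distinct codes seen up to (and including) its FIRST occurrence, minus 1.
--     # No incremental code->index mapping is ever built.
--     codes = [str(x) if full_code else str(x)[:3] for x in icds]
--     return [len(set(codes[:codes.index(c) + 1])) - 1 for c in codes]
-- ===== Notes on version B (the rewrite author's own statement) =====
-- stated objective: alternative
-- what changed: Replaced A's incremental code-to-index mapping (build a dict over the list, then scan again to look up) with a per-element closed formula: each code's index is the number of distinct codes in the prefix ending at its first occurrence, minus one, computed independently per element with index() and set(); no mapping is ever built.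
import Mathlib
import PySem

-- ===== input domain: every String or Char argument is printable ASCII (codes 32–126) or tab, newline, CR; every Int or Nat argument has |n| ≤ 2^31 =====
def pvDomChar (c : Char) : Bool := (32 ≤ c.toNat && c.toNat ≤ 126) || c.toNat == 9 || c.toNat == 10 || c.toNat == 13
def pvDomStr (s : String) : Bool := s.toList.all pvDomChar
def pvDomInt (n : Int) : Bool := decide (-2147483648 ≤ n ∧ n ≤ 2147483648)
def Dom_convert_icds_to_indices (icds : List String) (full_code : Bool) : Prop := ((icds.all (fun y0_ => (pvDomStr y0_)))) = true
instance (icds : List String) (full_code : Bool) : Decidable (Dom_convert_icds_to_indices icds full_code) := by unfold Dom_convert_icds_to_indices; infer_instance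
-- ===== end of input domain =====

-- B replaces A's incremental code→index mapping with a per-element closed formula:
-- each code's index = |set(prefix up to its first occurrence)| - 1 (objective: alternative).


-- ===== PORT A =====
-- A builds the full code→index dict over icds, then scans icds again looking each
-- code up; the lookup icd2idx[icd] is always present by construction (every code was
-- inserted by the first loop), so it is ported as getD — the KeyError path is dead code.
def convert_icds_to_indices (icds : List String) (full_code : Bool) : List Int :=
  let get_converted_icd := fun (icd : String) =>
    if full_code then icd else PySem.Str.slice icd none (some 3)
  let icd2idx : PySem.Dict String Int :=
    icds.foldl (fun d icd =>
      let c := get_converted_icd icd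
      if d.contains c = false then d.insert c ((d.size : Int)) else d) PySem.Dict.empty
  icds.foldl (fun indices icd =>
    indices ++ [icd2idx.getD (get_converted_icd icd) 0]) []

-- ===== PORT B =====
-- per-element formula: index of c = len(set(codes[:codes.index(c)+1])) - 1
def convert_icds_to_indices_alt (icds : List String) (full_code : Bool) : List Int :=
  let codes := icds.map (fun x => if full_code then x else PySem.Str.slice x none (some 3))
  codes.map (fun c =>
    ((PySem.Set.len (PySem.Set.ofList
        (PySem.List.slice codes none
          (some ((((PySem.List.index? codes c).getD 0 : Nat) : Int) + 1)))) : Int) - 1))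

-- ===== PRECONDITION & SPEC =====
def Spec_convert_icds_to_indices (icds : List String) (full_code : Bool) (out : List Int) : Prop := out = convert_icds_to_indices_alt icds full_code
instance (icds : List String) (full_code : Bool) (out : List Int) : Decidable (Spec_convert_icds_to_indices icds full_code out) := by unfold Spec_convert_icds_to_indices; infer_instance

-- ===== CLAIM (what is proved, stated in full; the proofs are below) =====
def Claim_equal_convert_icds_to_indices : Prop := ∀ (icds : List String) (full_code : Bool), Dom_convert_icds_to_indices icds full_code → Spec_convert_icds_to_indices icds full_code (convert_icds_to_indices icds full_code)

-- ===== LEMMAS AND PROOFS =====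

-- the list of distinct codes of cs appended (in first-occurrence order) after seen
def pvSeen (cs seen : List String) : List String :=
  cs.foldl (fun s c => if c ∈ s then s else s ++ [c]) seen

theorem pvSeen_nil (seen : List String) : pvSeen [] seen = seen := rfl

theorem pvSeen_cons (c : String) (cs seen : List String) :
    pvSeen (c :: cs) seen = pvSeen cs (if c ∈ seen then seen else seen ++ [c]) := rfl

theorem pvSeen_append_split (xs ys seen : List String) :
    pvSeen (xs ++ ys) seen = pvSeen ys (pvSeen xs seen) := by
  simp [pvSeen, List.foldl_append]

theorem pvSeen_append (cs seen : List String) : ∃ t, pvSeen cs seen = seen ++ t := by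
  induction cs generalizing seen with
  | nil => exact ⟨[], by simp [pvSeen_nil]⟩
  | cons c cs ih =>
    rw [pvSeen_cons]
    by_cases h : c ∈ seen
    · simpa [h] using ih seen
    · obtain ⟨t, ht⟩ := ih (seen ++ [c])
      exact ⟨c :: t, by simp [h, ht]⟩

theorem mem_pvSeen_of_mem {c : String} {cs : List String} (seen : List String)
    (h : c ∈ cs) : c ∈ pvSeen cs seen := by
  induction cs generalizing seen with
  | nil => cases h
  | cons x cs ih =>
    rw [pvSeen_cons]
    rcases List.mem_cons.mp h with rfl | h'
    · obtain ⟨t, ht⟩ := pvSeen_append cs (if c ∈ seen then seen else seen ++ [c])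
      rw [ht]
      by_cases hx : c ∈ seen <;> simp [hx]
    · exact ih _ h'

theorem not_mem_pvSeen {c : String} {cs seen : List String}
    (h1 : c ∉ seen) (h2 : c ∉ cs) : c ∉ pvSeen cs seen := by
  induction cs generalizing seen with
  | nil => simpa [pvSeen_nil]
  | cons x cs ih =>
    rw [pvSeen_cons]
    have hx : c ≠ x := fun h => h2 (h ▸ List.mem_cons_self)
    have h2' : c ∉ cs := fun h => h2 (List.mem_cons_of_mem _ h)
    by_cases hm : x ∈ seen
    · simpa [hm] using ih h1 h2'
    · have : c ∉ seen ++ [x] := by simp [h1, hx]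
      simpa [hm] using ih this h2'

-- index of a code already in seen is stable under the later appends of pvSeen
theorem idxOf_pvSeen_of_mem {c : String} {seen : List String} (cs : List String)
    (h : c ∈ seen) : (pvSeen cs seen).idxOf c = seen.idxOf c := by
  obtain ⟨t, ht⟩ := pvSeen_append cs seen
  rw [ht]
  exact List.idxOf_append_of_mem h

theorem idxOf_append_self {c : String} {seen : List String} (h : c ∉ seen) :
    (seen ++ [c]).idxOf c = seen.length := by
  rw [List.idxOf_append_of_notMem h]
  simp

theorem nodup_append_singleton {c : String} {seen : List String}
    (hnd : seen.Nodup) (hc : c ∉ seen) : (seen ++ [c]).Nodup := by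
  refine hnd.append (List.nodup_singleton c) ?_
  intro a ha hb
  rw [List.mem_singleton] at hb
  subst hb
  exact hc ha

-- pvSeen from the empty accumulator IS PySem.Set.ofList
theorem pvSeen_eq_ofList (cs : List String) :
    ∀ seen, pvSeen cs seen = cs.foldl PySem.Set.add seen := by
  induction cs with
  | nil => intro seen; rfl
  | cons x cs ih =>
    intro seen
    rw [pvSeen_cons, List.foldl_cons, ih]
    congr 1
    by_cases h : x ∈ seen <;> simp [PySem.Set.add, PySem.Set.contains, h]

-- A's dict-building loop: the dict maps each seen code to its first-occurrence rank
theorem dictA_spec (f : String → String) (xs : List String) (d : PySem.Dict String Int)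
    (seen : List String) (hk : d.keys = seen) (hnd : seen.Nodup)
    (hg : ∀ c ∈ seen, d.getD c 0 = (seen.idxOf c : Int)) :
    (xs.foldl (fun d icd =>
        if d.contains (f icd) = false then d.insert (f icd) ((d.size : Int)) else d) d).keys
      = pvSeen (xs.map f) seen ∧
    ∀ c ∈ pvSeen (xs.map f) seen,
      (xs.foldl (fun d icd =>
          if d.contains (f icd) = false then d.insert (f icd) ((d.size : Int)) else d) d).getD c 0
        = ((pvSeen (xs.map f) seen).idxOf c : Int) := by
  induction xs generalizing d seen with
  | nil => exact ⟨hk, hg⟩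
  | cons x xs ih =>
    have hcont : d.contains (f x) = decide (f x ∈ seen) := by
      rw [PySem.Dict.contains_eq_decide_mem_keys, hk]
    rw [List.foldl_cons, List.map_cons, pvSeen_cons]
    by_cases hc : f x ∈ seen
    · simp only [hcont, hc, decide_true, if_pos]
      simpa [hc] using ih d seen hk hnd hg
    · have hsz : d.size = seen.length := by
        have h1 : d.keys.length = d.items.length := by
          simp [PySem.Dict.keys]
        simp [PySem.Dict.size, ← h1, hk]
      have hcf : d.contains (f x) = false := by simp [hcont, hc]
      simp only [hcont, hc, decide_false, if_pos]
      have hnd' : (seen ++ [f x]).Nodup := nodup_append_singleton hnd hc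
      have hk' : (d.insert (f x) ((d.size : Int))).keys = seen ++ [f x] := by
        rw [PySem.Dict.keys_insert_of_not_contains, hk]
        exact hcf
      have hg' : ∀ c' ∈ seen ++ [f x],
          (d.insert (f x) ((d.size : Int))).getD c' 0 = ((seen ++ [f x]).idxOf c' : Int) := by
        intro c' hc'
        rw [PySem.Dict.getD_insert]
        rcases List.mem_append.mp hc' with h' | h'
        · have hne : c' ≠ f x := fun h => hc (h ▸ h')
          rw [if_neg hne, hg c' h', List.idxOf_append_of_mem h']
        · have : c' = f x := by simpa using h'
          subst this
          rw [if_pos rfl, idxOf_append_self hc, hsz]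
      simpa [hc] using ih _ (seen ++ [f x]) hk' hnd' hg'

theorem index?_getD_of_mem {c : String} {l : List String} (h : c ∈ l) :
    (PySem.List.index? l c).getD 0 = l.idxOf c := by
  obtain ⟨k, hk⟩ := Option.isSome_iff_exists.mp
    ((PySem.List.index?_isSome_iff (xs := l) (v := c)).mpr h)
  have h2 : l.idxOf? c = some k := by rw [← PySem.List.index?_eq_idxOf?, hk]
  rw [hk, Option.getD_some, List.idxOf_eq_getD_idxOf?, h2, Option.getD_some]

-- c is absent from the part of codes before its first occurrence
theorem not_mem_take_idxOf (l : List String) (c : String) : c ∉ l.take (l.idxOf c) := by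
  induction l with
  | nil => simp
  | cons x xs ih =>
    by_cases h : x = c
    · simp [h]
    · have hbe : (x == c) = false := by simp [h]
      simp only [List.idxOf_cons, hbe, cond_false, List.take_succ_cons, List.mem_cons]
      rintro (rfl | hm)
      · exact h rfl
      · exact ih hm

-- the closed formula: rank of c in the final distinct list = |distinct codes in the
-- prefix ending at c's first occurrence| - 1
theorem rank_eq_prefix_count {c : String} {codes : List String} (h : c ∈ codes) :
    ((pvSeen codes []).idxOf c : Int)
      = ((pvSeen (codes.take (codes.idxOf c + 1)) []).length : Int) - 1 := by
  have hjlt := List.idxOf_lt_length_of_mem h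
  set j := codes.idxOf c with hj
  have hget : codes[j] = c := List.getElem_idxOf hjlt
  have hnott : c ∉ codes.take j := not_mem_take_idxOf codes c
  have htake : codes.take (j + 1) = codes.take j ++ [c] := by
    rw [List.take_succ_eq_append_getElem hjlt, hget]
  have hnotp : c ∉ pvSeen (codes.take j) [] :=
    not_mem_pvSeen (by simp) hnott
  have h1 : pvSeen (codes.take (j + 1)) [] = pvSeen (codes.take j) [] ++ [c] := by
    rw [htake, pvSeen_append_split, pvSeen_cons, pvSeen_nil, if_neg hnotp]
  have h2 : (pvSeen codes []).idxOf c = (pvSeen (codes.take j) []).length := by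
    conv_lhs => rw [(List.take_append_drop (j + 1) codes).symm]
    rw [pvSeen_append_split, h1, idxOf_pvSeen_of_mem _ (by simp),
        idxOf_append_self hnotp]
  rw [h2, h1]
  simp only [List.length_append, List.length_cons, List.length_nil]
  push_cast
  ring

-- ===== VERDICT (by name: the statement is the Claim_ definition above) =====
theorem convert_icds_to_indices_spec : Claim_equal_convert_icds_to_indices := by
  unfold Claim_equal_convert_icds_to_indices
  intro icds full_code _
  unfold Spec_convert_icds_to_indices
  unfold convert_icds_to_indices convert_icds_to_indices_alt
  simp only []
  set conv := fun (icd : String) =>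
    if full_code then icd else PySem.Str.slice icd none (some 3) with hconv
  set codes := icds.map conv with hcodes
  obtain ⟨hkeys, hget⟩ := dictA_spec conv icds PySem.Dict.empty []
    (by simp) List.nodup_nil (by intro c hc; cases hc)
  have hA : icds.foldl (fun indices icd =>
      indices ++ [(icds.foldl (fun d icd =>
        if d.contains (conv icd) = false then d.insert (conv icd) ((d.size : Int)) else d)
        PySem.Dict.empty).getD (conv icd) 0]) []
      = codes.map (fun c => ((pvSeen codes []).idxOf c : Int)) := by
    rw [PySem.List.foldl_append_singleton_eq_map, hcodes, List.map_map]
    apply List.map_congr_left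
    intro icd hicd
    exact hget (conv icd) (mem_pvSeen_of_mem [] (List.mem_map_of_mem hicd))
  rw [hA]
  apply List.map_congr_left
  intro c hc
  have hidx : ((PySem.List.index? codes c).getD 0 : Nat) = codes.idxOf c :=
    index?_getD_of_mem hc
  have hcast : ((((PySem.List.index? codes c).getD 0 : Nat) : Int) + 1)
      = ((codes.idxOf c + 1 : Nat) : Int) := by
    rw [hidx]; push_cast; ring
  rw [hcast, PySem.List.slice_to_natCast]
  rw [rank_eq_prefix_count hc]
  congr 2
  rw [pvSeen_eq_ofList]
  rfl
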